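-- pv_equiv track=rewrite | github.com/sahilmutha1999/ChatBot-Development-Portal | backend/services/text_parser.py | _fix_quotes
-- ===== SOURCE A (Python) =====
-- def _fix_quotes(text: str) -> str:
--     """
--     Convert single quotes to double quotes while preserving quoted content
--     """
--     result = []
--     i = 0
--     in_double_quotes = False
--     in_single_quotes = False
--
--     while i < len(text):
--         char = text[i]
--
--         # Handle escape sequences first
--         if char == '\\':
--             result.append(char)
--             i += 1
--             if i < len(text):
--                 result.append(text[i])
--             i += 1
--             continue
--
--         if char == '"' and not in_single_quotes:
--             in_double_quotes = not in_double_quotes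
--             result.append(char)
--         elif char == "'" and not in_double_quotes:
--             # Convert single quotes to double quotes
--             result.append('"')
--             in_single_quotes = not in_single_quotes
--         else:
--             result.append(char)
--
--         i += 1
--
--     return ''.join(result)
-- ===== SOURCE B (Python) =====
-- def _fix_quotes(text: str) -> str:
--     """Two-stage: lex the text into alternating plain chunks and escape pairs,
--     then transform the plain chunks (quote conversion) while copying escape
--     tokens verbatim."""
--     # stage 1: tokenize — tokens[0::2] are plain chunks, tokens[1::2] are escape tokens
--     tokens = []
--     i = 0
--     while True:
--         j = text.find('\\', i)
--         if j == -1: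
--             tokens.append(text[i:])
--             break
--         tokens.append(text[i:j])
--         tokens.append(text[j:j + 2])  # '\' plus escaped char (lone '\' at end of text)
--         i = j + 2
--     # stage 2: convert quotes in plain chunks, threading the quote state across chunks
--     out = []
--     in_double = False
--     in_single = False
--     for k, tok in enumerate(tokens):
--         if k % 2 == 1:
--             out.append(tok)  # escape token, verbatim; does not affect quote state
--         else:
--             for ch in tok:
--                 if ch == '"' and not in_single:
--                     in_double = not in_double
--                     out.append(ch)
--                 elif ch == "'" and not in_double:
--                     out.append('"')
--                     in_single = not in_single
--                 else:
--                     out.append(ch)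
--     return ''.join(out)
-- ===== Notes on version B (the rewrite author's own statement) =====
-- stated objective: alternative
-- what changed: Replaces A's single index-based loop with in-loop lookahead by a two-stage pipeline: a lexer that splits the text into alternating plain chunks and backslash-escape pairs, then a transformer that converts quotes inside plain chunks while copying escape tokens verbatim and threading the quote state across chunks.
import Mathlib
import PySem

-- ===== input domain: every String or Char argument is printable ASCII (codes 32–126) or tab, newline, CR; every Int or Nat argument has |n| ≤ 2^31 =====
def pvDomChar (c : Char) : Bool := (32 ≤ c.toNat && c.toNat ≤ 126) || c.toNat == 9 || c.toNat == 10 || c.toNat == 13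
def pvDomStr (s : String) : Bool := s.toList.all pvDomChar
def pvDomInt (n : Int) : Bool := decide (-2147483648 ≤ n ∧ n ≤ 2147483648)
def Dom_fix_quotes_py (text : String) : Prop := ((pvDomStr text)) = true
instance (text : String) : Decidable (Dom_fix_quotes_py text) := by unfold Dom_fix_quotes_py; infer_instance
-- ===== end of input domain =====

-- B replaces A's one-pass index/lookahead loop by a two-stage pipeline (lexer into
-- plain/escape tokens, then a quote-converting transformer over the tokens); objective: alternative.
-- ===== PORT A =====
-- A's while-loop: consumes the text front-to-back; on '\' it emits the next char too (i += 2)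
def fixQuotesLoopA : List Char → Bool → Bool → List Char
  | [], _, _ => []
  | c :: rest, dq, sq =>
    if c = '\\' then
      match rest with
      | [] => [c]
      | d :: rest' => c :: d :: fixQuotesLoopA rest' dq sq
    else if c = '"' && !sq then c :: fixQuotesLoopA rest (!dq) sq
    else if c = '\'' && !dq then '"' :: fixQuotesLoopA rest dq (!sq)
    else c :: fixQuotesLoopA rest dq sq

def fix_quotes_py (text : String) : String :=
  String.ofList (fixQuotesLoopA text.toList false false)

-- ===== PORT B =====
-- stage 1 of B: split the text at backslashes into alternating tokens
-- (even positions: plain chunks, odd positions: escape pairs / a lone trailing '\')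
def splitEsc : List Char → List (List Char)
  | [] => [[]]
  | c :: rest =>
    if c = '\\' then
      match rest with
      | [] => [[], ['\\'], []]
      | d :: rest' => [] :: [c, d] :: splitEsc rest'
    else
      match splitEsc rest with
      | [] => [[c]]          -- unreachable: splitEsc always returns a nonempty list
      | t :: ts => (c :: t) :: ts

-- stage 2 of B, inner loop: convert quotes in one plain chunk, returning the new state
def convChunk : List Char → Bool → Bool → (List Char × Bool × Bool)
  | [], dq, sq => ([], dq, sq)
  | c :: rest, dq, sq =>
    if c = '"' && !sq then
      let r := convChunk rest (!dq) sq; (c :: r.1, r.2)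
    else if c = '\'' && !dq then
      let r := convChunk rest dq (!sq); ('"' :: r.1, r.2)
    else
      let r := convChunk rest dq sq; (c :: r.1, r.2)

-- stage 2 of B, outer loop: plain chunks are transformed, escape tokens copied verbatim
def goTokens : List (List Char) → Bool → Bool → List Char
  | [], _, _ => []
  | [t], dq, sq => (convChunk t dq sq).1
  | t :: e :: ts, dq, sq =>
    let r := convChunk t dq sq
    r.1 ++ e ++ goTokens ts r.2.1 r.2.2

def fix_quotes_py_alt (text : String) : String :=
  String.ofList (goTokens (splitEsc text.toList) false false)

-- ===== PRECONDITION & SPEC =====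
def Spec_fix_quotes_py (text : String) (out : String) : Prop := out = fix_quotes_py_alt text
instance (text : String) (out : String) : Decidable (Spec_fix_quotes_py text out) := by unfold Spec_fix_quotes_py; infer_instance

-- ===== CLAIM (what is proved, stated in full; the proofs are below) =====
def Claim_equal_fix_quotes_py : Prop := ∀ (text : String), Dom_fix_quotes_py text → Spec_fix_quotes_py text (fix_quotes_py text)

-- ===== LEMMAS AND PROOFS =====
theorem splitEsc_ne_nil (l : List Char) : splitEsc l ≠ [] := by
  match l with
  | [] => simp [splitEsc]
  | c :: rest =>
    unfold splitEsc
    split_ifs with h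
    · cases rest <;> simp
    · cases hs : splitEsc rest <;> simp

-- emitting one non-backslash char: goTokens on a chunk extended by c equals the
-- branch-emitted char followed by goTokens with the updated state
theorem goTokens_cons_char (c : Char) (t : List Char) (ts : List (List Char)) (dq sq : Bool) :
    goTokens ((c :: t) :: ts) dq sq =
      (if c = '"' && !sq then c :: goTokens (t :: ts) (!dq) sq
       else if c = '\'' && !dq then '"' :: goTokens (t :: ts) dq (!sq)
       else c :: goTokens (t :: ts) dq sq) := by
  cases ts with
  | nil =>
    simp only [goTokens, convChunk]
    split_ifs <;> rfl
  | cons e ts' =>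
    simp only [goTokens, convChunk]
    split_ifs <;> rfl

theorem fixQuotes_eq (n : Nat) : ∀ (l : List Char), l.length ≤ n → ∀ (dq sq : Bool),
    fixQuotesLoopA l dq sq = goTokens (splitEsc l) dq sq := by
  induction n with
  | zero =>
    intro l hl dq sq
    have : l = [] := List.eq_nil_of_length_eq_zero (Nat.le_zero.mp hl)
    subst this
    simp [fixQuotesLoopA, splitEsc, goTokens, convChunk]
  | succ n ih =>
    intro l hl dq sq
    match l with
    | [] => simp [fixQuotesLoopA, splitEsc, goTokens, convChunk]
    | c :: rest =>
      by_cases hb : c = '\\'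
      · subst hb
        match rest with
        | [] => simp [fixQuotesLoopA, splitEsc, goTokens, convChunk]
        | d :: rest' =>
          have hlen : rest'.length ≤ n := by simp at hl; omega
          simp [fixQuotesLoopA, splitEsc, goTokens, convChunk, ih rest' hlen dq sq]
      · have hlen : rest.length ≤ n := by simp at hl; omega
        obtain ⟨t, ts, hts⟩ : ∃ t ts, splitEsc rest = t :: ts := by
          cases hs : splitEsc rest with
          | nil => exact absurd hs (splitEsc_ne_nil rest)
          | cons t ts => exact ⟨t, ts, rfl⟩
        have hsplit : splitEsc (c :: rest) = (c :: t) :: ts := by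
          rw [splitEsc.eq_def]; simp [hb, hts]
        rw [hsplit, goTokens_cons_char c t ts dq sq, ← hts,
            ← ih rest hlen (!dq) sq, ← ih rest hlen dq (!sq), ← ih rest hlen dq sq]
        rw [fixQuotesLoopA.eq_def]
        simp [hb]

-- ===== VERDICT (by name: the statement is the Claim_ definition above) =====
theorem fix_quotes_py_spec : Claim_equal_fix_quotes_py := by
  intro text _
  unfold Spec_fix_quotes_py fix_quotes_py fix_quotes_py_alt
  rw [fixQuotes_eq text.toList.length text.toList le_rfl]
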